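-- pv_equiv track=rewrite | github.com/PennyLaneAI/pennylane | pennylane/templates/state_preparations/state_prep_qrom.py | sum_by_prefix
-- ===== SOURCE A (Python) =====
-- def index_to_bitstring(integer, n):
--     """ Converts an integer to a bitstring of length n. """
--     return bin(integer)[2:].zfill(n)
--
-- def sum_by_prefix(data, prefix):
--     """ Adds the elements of data whose index binary representation begin with `prefix`. """
--     n = len(data).bit_length() - 1
--     sum_result = 0
--     for i, value in enumerate(data):
--         bitstring = index_to_bitstring(i, n)
--         if bitstring.startswith(prefix):
--             sum_result += value
--     return sum_result
-- ===== SOURCE B (Python) =====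
-- def sum_by_prefix(data, prefix):
--     """ Matching indices form contiguous index ranges: sum those slices directly. """
--     N = len(data)
--     if N == 0 or any(c not in "01" for c in prefix):
--         return 0
--     n = N.bit_length() - 1
--     k = len(prefix)
--     if n == 0:
--         # the single index 0 has bitstring "0"
--         return data[0] if prefix in ("", "0") else 0
--     p = 0
--     for c in prefix:
--         p = 2 * p + (c == '1')
--     total = 0
--     if k <= n:
--         # indices below 2**n have n-bit strings; matches are [p*2**(n-k), (p+1)*2**(n-k))
--         total += sum(data[p << (n - k):(p + 1) << (n - k)])
--     if k <= n + 1: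
--         # indices in [2**n, N) have (n+1)-bit strings
--         lo = max(p << (n + 1 - k), 1 << n)
--         hi = min((p + 1) << (n + 1 - k), N)
--         if lo < hi:
--             total += sum(data[lo:hi])
--     return total
-- ===== Notes on version B (the rewrite author's own statement) =====
-- stated objective: faster
-- what changed: Instead of building an n-bit string for every index and testing startswith, B observes that the matching indices form at most two contiguous ranges (one for n-bit indices below 2**n, one for (n+1)-bit indices above) computed arithmetically from the prefix value, and sums those two slices directly.
import Mathlib
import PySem

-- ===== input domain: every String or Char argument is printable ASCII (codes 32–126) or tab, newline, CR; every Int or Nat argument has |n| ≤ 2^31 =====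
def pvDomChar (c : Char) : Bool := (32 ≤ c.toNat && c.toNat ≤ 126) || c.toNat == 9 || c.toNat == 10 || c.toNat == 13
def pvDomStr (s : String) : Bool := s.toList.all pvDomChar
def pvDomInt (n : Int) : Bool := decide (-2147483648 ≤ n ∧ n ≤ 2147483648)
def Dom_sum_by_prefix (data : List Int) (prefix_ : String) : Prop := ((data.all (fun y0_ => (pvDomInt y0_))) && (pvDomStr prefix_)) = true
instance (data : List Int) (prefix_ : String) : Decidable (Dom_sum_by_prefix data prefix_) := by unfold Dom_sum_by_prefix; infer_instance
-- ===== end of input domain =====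

-- B replaces A's per-index bitstring test by direct summation of the (at most two)
-- contiguous index ranges whose binary representations start with the prefix (objective: faster).

-- ===== PORT A =====
def index_to_bitstring (integer : Int) (n : Int) : String :=
  PySem.Str.zfill (PySem.Str.slice (PySem.Int.pyBin integer) (some 2) none) n

def sum_by_prefix (data : List Int) (prefix_ : String) : Int :=
  let n : Int := (PySem.Int.bitLength (PySem.List.len data) : Int) - 1
  (PySem.List.enumerate data).foldl
    (fun acc iv =>
      if PySem.Str.startswith (index_to_bitstring iv.1 n) prefix_ then acc + iv.2 else acc) 0

-- ===== PORT B =====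
def pvBinVal (cs : List Char) : Nat :=
  cs.foldl (fun a c => 2 * a + (if c = '1' then 1 else 0)) 0

def sum_by_prefix_alt (data : List Int) (prefix_ : String) : Int :=
  let N := data.length
  let cs := prefix_.toList
  if N = 0 ∨ ¬ (cs.all fun c => c = '0' || c = '1') then 0
  else
    let n := PySem.Int.bitLength (N : Int) - 1
    let k := cs.length
    if n = 0 then (if cs = [] ∨ cs = ['0'] then data.headD 0 else 0)
    else
      let p := pvBinVal cs
      let t1 : Int := if k ≤ n then
          (PySem.List.slice data (some ((p <<< (n - k) : Nat) : Int))
            (some (((p + 1) <<< (n - k) : Nat) : Int))).sum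
        else 0
      let t2 : Int := if k ≤ n + 1 then
          (let lo := max (p <<< (n + 1 - k)) (1 <<< n)
           let hi := min ((p + 1) <<< (n + 1 - k)) N
           if lo < hi then (PySem.List.slice data (some (lo : Int)) (some (hi : Int))).sum else 0)
        else 0
      t1 + t2

-- ===== PRECONDITION & SPEC =====
def Spec_sum_by_prefix (data : List Int) (prefix_ : String) (out : Int) : Prop := out = sum_by_prefix_alt data prefix_
instance (data : List Int) (prefix_ : String) (out : Int) : Decidable (Spec_sum_by_prefix data prefix_ out) := by unfold Spec_sum_by_prefix; infer_instance

-- ===== CLAIM (what is proved, stated in full; the proofs are below) =====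
def Claim_equal_sum_by_prefix : Prop := ∀ (data : List Int) (prefix_ : String), Dom_sum_by_prefix data prefix_ → Spec_sum_by_prefix data prefix_ (sum_by_prefix data prefix_)

-- ===== LEMMAS AND PROOFS =====

/-- Big-endian bitstring of `i` of width `m` (proof-side reference). -/
def pvBits : Nat → Nat → List Char
  | 0, _ => []
  | m + 1, i => (if 2 ^ m ≤ i then '1' else '0') :: pvBits m (i % 2 ^ m)

theorem length_pvBits (m : Nat) : ∀ i, (pvBits m i).length = m := by
  induction m with
  | zero => intro i; rfl
  | succ m ih => intro i; simp [pvBits, ih]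

theorem mem_pvBits {c : Char} : ∀ (m i : Nat), c ∈ pvBits m i → c = '0' ∨ c = '1' := by
  intro m
  induction m with
  | zero => intro i h; simp [pvBits] at h
  | succ m ih =>
    intro i h
    simp only [pvBits, List.mem_cons] at h
    rcases h with h | h
    · split at h <;> simp [h]
    · exact ih _ h

theorem pvBits_zero (m : Nat) : pvBits m 0 = List.replicate m '0' := by
  induction m with
  | zero => rfl
  | succ m ih =>
    have h : ¬ (2 ^ m ≤ 0) := by
      have : 0 < 2 ^ m := Nat.pow_pos (by norm_num)
      omega
    simp [pvBits, h, ih, List.replicate_succ]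

theorem pvBits_snoc : ∀ (m i : Nat), i < 2 ^ (m + 1) →
    pvBits (m + 1) i = pvBits m (i / 2) ++ [if i % 2 = 1 then '1' else '0'] := by
  intro m
  induction m with
  | zero =>
    intro i hi
    interval_cases i <;> decide
  | succ m ih =>
    intro i hi
    have h2 : (0:Nat) < 2 := by norm_num
    have hmod : i % 2 ^ (m + 1) < 2 ^ (m + 1) := Nat.mod_lt _ (Nat.pow_pos (by norm_num))
    have e1 : i % 2 ^ (m + 1) / 2 = i / 2 % 2 ^ m := by
      have h : (2:Nat) ^ (m + 1) = 2 * 2 ^ m := by ring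
      rw [h, Nat.mod_mul_right_div_self]
    have e2 : i % 2 ^ (m + 1) % 2 = i % 2 := Nat.mod_mod_of_dvd i ⟨2 ^ m, by ring⟩
    have etop : (2 ^ (m + 1) ≤ i) ↔ (2 ^ m ≤ i / 2) := by
      rw [Nat.le_div_iff_mul_le h2, ← pow_succ]
    calc pvBits (m + 1 + 1) i
        = (if 2 ^ (m + 1) ≤ i then '1' else '0') :: pvBits (m + 1) (i % 2 ^ (m + 1)) := rfl
      _ = (if 2 ^ m ≤ i / 2 then '1' else '0') ::
            (pvBits m (i / 2 % 2 ^ m) ++ [if i % 2 = 1 then '1' else '0']) := by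
          rw [ih _ hmod, e1, e2]
          simp only [etop]
      _ = pvBits (m + 1) (i / 2) ++ [if i % 2 = 1 then '1' else '0'] := rfl

theorem pvBits_pad : ∀ (d m i : Nat), i < 2 ^ m →
    pvBits (m + d) i = List.replicate d '0' ++ pvBits m i := by
  intro d
  induction d with
  | zero => intro m i h; simp
  | succ d ih =>
    intro m i h
    have hlt : i < 2 ^ (m + d) :=
      lt_of_lt_of_le h (Nat.pow_le_pow_right (by norm_num) (by omega))
    have hmd : m + (d + 1) = (m + d) + 1 := by omega
    rw [hmd]
    calc pvBits ((m + d) + 1) i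
        = '0' :: pvBits (m + d) (i % 2 ^ (m + d)) := by
          have hc : ¬ (2 ^ (m + d) ≤ i) := by omega
          simp [pvBits, hc]
      _ = '0' :: (List.replicate d '0' ++ pvBits m i) := by
          rw [Nat.mod_eq_of_lt hlt, ih m i h]
      _ = List.replicate (d + 1) '0' ++ pvBits m i := by
          simp [List.replicate_succ]

theorem toDigitsCore_acc : ∀ (f n : Nat) (ds : List Char),
    Nat.toDigitsCore 2 f n ds = Nat.toDigitsCore 2 f n [] ++ ds := by
  intro f
  induction f with
  | zero => intro n ds; simp [Nat.toDigitsCore]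
  | succ f ih =>
    intro n ds
    simp only [Nat.toDigitsCore]
    by_cases h : n / 2 = 0
    · simp [h]
    · simp only [h]
      rw [ih (n / 2) (Nat.digitChar (n % 2) :: ds), ih (n / 2) [Nat.digitChar (n % 2)]]
      simp

theorem lt_two_pow_bl (n : Nat) : n < 2 ^ PySem.Int.bitLength (n : Int) := by
  have := PySem.Int.lt_two_pow_bitLength (n : Int)
  simpa using this

theorem two_pow_bl_le (n : Nat) (h : 0 < n) : 2 ^ (PySem.Int.bitLength (n : Int) - 1) ≤ n := by
  have := PySem.Int.two_pow_bitLength_le (n : Int) (by exact_mod_cast h.ne')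
  simpa using this

theorem bl_pos (n : Nat) (h : 0 < n) : 1 ≤ PySem.Int.bitLength (n : Int) := by
  by_contra hc
  have h0 : PySem.Int.bitLength (n : Int) = 0 := by omega
  have := lt_two_pow_bl n
  rw [h0] at this
  omega

theorem bl_eq (n m : Nat) (h1 : 2 ^ m ≤ n) (h2 : n < 2 ^ (m + 1)) :
    PySem.Int.bitLength (n : Int) = m + 1 := by
  have hp : 0 < n := lt_of_lt_of_le (Nat.pow_pos (by norm_num)) h1
  have ha := lt_two_pow_bl n
  have hb := two_pow_bl_le n hp
  have hL := bl_pos n hp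
  set L := PySem.Int.bitLength (n : Int) with hLdef
  have c1 : m < L := by
    by_contra hc
    have : 2 ^ L ≤ 2 ^ m := Nat.pow_le_pow_right (by norm_num) (by omega)
    omega
  have c2 : L - 1 < m + 1 := by
    by_contra hc
    have : 2 ^ (m + 1) ≤ 2 ^ (L - 1) := Nat.pow_le_pow_right (by norm_num) (by omega)
    omega
  omega

theorem toDigitsCore_eq_pvBits : ∀ (f n : Nat), 0 < n → n < f →
    Nat.toDigitsCore 2 f n [] = pvBits (PySem.Int.bitLength (n : Int)) n := by
  intro f
  induction f with
  | zero => intro n h hf; omega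
  | succ f ih =>
    intro n hn hf
    by_cases h : n / 2 = 0
    · have hn1 : n = 1 := by omega
      subst hn1
      simp [Nat.toDigitsCore]
      decide
    · have hn2 : 2 ≤ n := by omega
      have step : Nat.toDigitsCore 2 (f + 1) n []
          = Nat.toDigitsCore 2 f (n / 2) [] ++ [Nat.digitChar (n % 2)] := by
        simp only [Nat.toDigitsCore]
        rw [if_neg h, toDigitsCore_acc]
      rw [step, ih (n / 2) (by omega) (by omega)]
      have hL : PySem.Int.bitLength (n : Int)
          = PySem.Int.bitLength ((n / 2 : Nat) : Int) + 1 := by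
        exact PySem.Int.bitLength_natCast (by omega)
      rw [hL]
      have hlt : n < 2 ^ (PySem.Int.bitLength ((n / 2 : Nat) : Int) + 1) := by
        have := lt_two_pow_bl n
        rw [hL] at this
        exact this
      rw [pvBits_snoc _ n hlt]
      congr 1
      rcases Nat.mod_two_eq_zero_or_one n with h2 | h2 <;> rw [h2] <;> decide

theorem toBinChars_eq (n : Nat) (h : 0 < n) :
    PySem.Int.toBinChars (n : Int) = pvBits (PySem.Int.bitLength (n : Int)) n := by
  unfold PySem.Int.toBinChars
  have h1 : ¬ ((n : Int) < 0) := by simp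
  rw [if_neg h1]
  have h2 : ((n : Int)).toNat = n := Int.toNat_natCast n
  rw [h2]
  unfold Nat.toDigits
  exact toDigitsCore_eq_pvBits (n + 1) n h (by omega)

theorem zfill_of_le (cs : List Char) (w : Int) (h : w ≤ (cs.length : Int)) :
    PySem.Chars.zfill cs w = cs := by
  unfold PySem.Chars.zfill
  simp [h]

/-- The padded bitstring A builds equals `pvBits`. -/
theorem pvPad (m i : Nat) (hm : 1 ≤ m) (hi : i < 2 ^ m) :
    PySem.Chars.zfill (PySem.Int.toBinChars (i : Int)) (m : Int) = pvBits m i := by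
  rcases Nat.eq_zero_or_pos i with h0 | hpos
  · subst h0
    have ht : PySem.Int.toBinChars ((0 : Nat) : Int) = ['0'] := by decide
    rw [ht, pvBits_zero]
    unfold PySem.Chars.zfill
    by_cases hle : (m : Int) ≤ ((['0'] : List Char).length : Int)
    · have hm1 : m = 1 := by simp at hle; omega
      subst hm1
      simp
    · rw [if_neg hle]
      have hns : ¬ ('0' = '+' ∨ '0' = '-') := by decide
      simp only [hns]
      have h1 : (m : Int).toNat = m := Int.toNat_natCast m
      have h2 : m = (m - 1) + 1 := by omega
      simp only [List.length_cons, List.length_nil, h1]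
      rw [h2, List.replicate_succ']
      simp
  · have hbe := toBinChars_eq i hpos
    set L := PySem.Int.bitLength (i : Int) with hLdef
    have hlen : (PySem.Int.toBinChars (i : Int)).length = L := by
      rw [hbe]; exact length_pvBits L i
    have hL1 : 1 ≤ L := by rw [hLdef]; exact bl_pos i hpos
    have hLle : L ≤ m := by
      have h1 := two_pow_bl_le i hpos
      rw [← hLdef] at h1
      by_contra hc
      have h2 : 2 ^ m ≤ 2 ^ (L - 1) := Nat.pow_le_pow_right (by norm_num) (by omega)
      have h3 := le_trans h2 h1
      omega
    rcases eq_or_lt_of_le hLle with heq | hlt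
    · rw [zfill_of_le _ _ (by rw [hlen, heq]), hbe, heq]
    · rw [hbe]
      unfold PySem.Chars.zfill
      have hlen2 : (pvBits L i).length = L := length_pvBits L i
      have hnle : ¬ ((m : Int) ≤ ((pvBits L i).length : Int)) := by
        rw [hlen2]; exact_mod_cast Nat.not_le.2 hlt
      rw [if_neg hnle]
      obtain ⟨c, rest, hcr⟩ : ∃ c rest, pvBits L i = c :: rest := by
        rcases hp : pvBits L i with _ | ⟨c, rest⟩
        · exfalso
          have := length_pvBits L i
          rw [hp] at this
          simp at this
          omega
        · exact ⟨c, rest, rfl⟩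
      rw [hcr]
      have hcb : c = '0' ∨ c = '1' := mem_pvBits L i (by rw [hcr]; exact List.mem_cons_self)
      have hns : ¬ (c = '+' ∨ c = '-') := by
        rcases hcb with h | h <;> subst h <;> decide
      simp only [if_neg hns]
      rw [← hcr]
      have h1 : (m : Int).toNat = m := Int.toNat_natCast m
      rw [h1, hlen2]
      have hilt : i < 2 ^ L := by rw [hLdef]; exact lt_two_pow_bl i
      have := pvBits_pad (m - L) L i hilt
      have hm2 : L + (m - L) = m := by omega
      rw [hm2] at this
      rw [this]

theorem pvBinVal_foldl (cs : List Char) : ∀ (a : Nat),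
    cs.foldl (fun a c => 2 * a + (if c = '1' then 1 else 0)) a = a * 2 ^ cs.length + pvBinVal cs := by
  induction cs with
  | nil => intro a; simp [pvBinVal]
  | cons c t ih =>
    intro a
    have h1 := ih (2 * a + (if c = '1' then 1 else 0))
    have h2 := ih (2 * 0 + (if c = '1' then 1 else 0))
    simp only [List.foldl_cons, pvBinVal] at h1 h2 ⊢
    rw [h1, h2, List.length_cons, pow_succ]
    ring

theorem pvBinVal_cons (c : Char) (cs : List Char) :
    pvBinVal (c :: cs) = (if c = '1' then 1 else 0) * 2 ^ cs.length + pvBinVal cs := by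
  have h := pvBinVal_foldl cs (2 * 0 + (if c = '1' then 1 else 0))
  simp only [pvBinVal, List.foldl_cons] at h ⊢
  rw [h]
  ring

theorem pvBinVal_lt (cs : List Char) : pvBinVal cs < 2 ^ cs.length := by
  induction cs with
  | nil => simp [pvBinVal]
  | cons c t ih =>
    rw [pvBinVal_cons, List.length_cons, pow_succ]
    split_ifs <;> omega

/-- Characterisation of `startswith` on padded bitstrings. -/
theorem prefix_iff : ∀ (cs : List Char) (m i : Nat), i < 2 ^ m →
    (cs <+: pvBits m i ↔
      cs.length ≤ m ∧ (∀ c ∈ cs, c = '0' ∨ c = '1') ∧ i / 2 ^ (m - cs.length) = pvBinVal cs) := by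
  intro cs
  induction cs with
  | nil =>
    intro m i hi
    simp [pvBinVal, Nat.div_eq_of_lt hi]
  | cons c t ih =>
    intro m i hi
    cases m with
    | zero =>
      constructor
      · intro hpre
        have := hpre.length_le
        simp [length_pvBits] at this
      · intro ⟨h1, _, _⟩
        simp at h1
    | succ m =>
      have hq0 : 0 < 2 ^ (m - t.length) := Nat.pow_pos (by norm_num)
      have hr : i % 2 ^ m < 2 ^ m := Nat.mod_lt _ (Nat.pow_pos (by norm_num))
      have iht := ih m (i % 2 ^ m) hr
      by_cases hk : t.length ≤ m
      · -- main case
        have hsplit : (c :: t <+: pvBits (m + 1) i) ↔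
            (c = (if 2 ^ m ≤ i then '1' else '0') ∧ t <+: pvBits m (i % 2 ^ m)) := by
          simp [pvBits, List.cons_prefix_cons]
        have hexp : m + 1 - (c :: t).length = m - t.length := by simp
        have hsp : (2 : Nat) ^ m = 2 ^ t.length * 2 ^ (m - t.length) := by
          rw [← pow_add]
          congr 1
          omega
        have hdiv : i / 2 ^ (m - t.length)
            = 2 ^ t.length * (i / 2 ^ m) + (i % 2 ^ m) / 2 ^ (m - t.length) := by
          have h2 : (2 ^ t.length * (i / 2 ^ m)) * 2 ^ (m - t.length) = 2 ^ m * (i / 2 ^ m) := by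
            rw [hsp]; ring
          have h3 := Nat.mod_add_div i (2 ^ m)
          have h1 : i = i % 2 ^ m + (2 ^ t.length * (i / 2 ^ m)) * 2 ^ (m - t.length) := by omega
          calc i / 2 ^ (m - t.length)
              = (i % 2 ^ m + (2 ^ t.length * (i / 2 ^ m)) * 2 ^ (m - t.length))
                  / 2 ^ (m - t.length) := by rw [← h1]
            _ = i % 2 ^ m / 2 ^ (m - t.length) + 2 ^ t.length * (i / 2 ^ m) :=
                Nat.add_mul_div_right _ _ hq0
            _ = 2 ^ t.length * (i / 2 ^ m) + i % 2 ^ m / 2 ^ (m - t.length) := by ring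
        have hhi : i / 2 ^ m ≤ 1 := by
          have h2 : i / 2 ^ m < 2 := by
            apply (Nat.div_lt_iff_lt_mul (Nat.pow_pos (by norm_num))).2
            calc i < 2 ^ (m + 1) := hi
              _ = 2 * 2 ^ m := by ring
          omega
        have hrq : (i % 2 ^ m) / 2 ^ (m - t.length) < 2 ^ t.length := by
          apply (Nat.div_lt_iff_lt_mul hq0).2
          calc i % 2 ^ m < 2 ^ m := hr
            _ = 2 ^ t.length * 2 ^ (m - t.length) := hsp
        have hv : pvBinVal t < 2 ^ t.length := pvBinVal_lt t
        have hv1 : pvBinVal ('1' :: t) = 2 ^ t.length + pvBinVal t := by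
          rw [pvBinVal_cons]; simp
        have hv0 : pvBinVal ('0' :: t) = pvBinVal t := by
          rw [pvBinVal_cons]; simp
        rw [hsplit, iht, hexp]
        by_cases h2m : 2 ^ m ≤ i
        · have hd : i / 2 ^ m = 1 := by
            have h1 : 1 ≤ i / 2 ^ m := by
              apply (Nat.le_div_iff_mul_le (Nat.pow_pos (by norm_num))).2
              omega
            omega
          have hdiv1 : i / 2 ^ (m - t.length)
              = 2 ^ t.length + (i % 2 ^ m) / 2 ^ (m - t.length) := by
            rw [hdiv, hd]; ring
          simp only [if_pos h2m]
          constructor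
          · rintro ⟨hc, -, hbin, hV⟩
            subst hc
            refine ⟨by simp only [List.length_cons]; omega, ?_, ?_⟩
            · intro x hx
              rcases List.mem_cons.1 hx with h | h
              · right; exact h
              · exact hbin x h
            · rw [hdiv1, hv1, hV]
          · rintro ⟨hl, hbin, heq⟩
            have hcb := hbin c List.mem_cons_self
            have hbt : ∀ x ∈ t, x = '0' ∨ x = '1' :=
              fun x hx => hbin x (List.mem_cons_of_mem c hx)
            rcases hcb with hc0 | hc1
            · exfalso
              subst hc0
              rw [hdiv1, hv0] at heq
              have h9 : 2 ^ t.length ≤ pvBinVal t := heq ▸ Nat.le_add_right _ _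
              exact absurd h9 (Nat.not_le.2 hv)
            · subst hc1
              rw [hdiv1, hv1] at heq
              exact ⟨rfl, hk, hbt, Nat.add_left_cancel heq⟩
        · have hd : i / 2 ^ m = 0 := Nat.div_eq_of_lt (by omega)
          have hdiv0 : i / 2 ^ (m - t.length) = (i % 2 ^ m) / 2 ^ (m - t.length) := by
            rw [hdiv, hd]; ring
          simp only [if_neg h2m]
          constructor
          · rintro ⟨hc, -, hbin, hV⟩
            subst hc
            refine ⟨by simp only [List.length_cons]; omega, ?_, ?_⟩
            · intro x hx
              rcases List.mem_cons.1 hx with h | h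
              · left; exact h
              · exact hbin x h
            · rw [hdiv0, hv0, hV]
          · rintro ⟨hl, hbin, heq⟩
            have hcb := hbin c List.mem_cons_self
            have hbt : ∀ x ∈ t, x = '0' ∨ x = '1' :=
              fun x hx => hbin x (List.mem_cons_of_mem c hx)
            rcases hcb with hc0 | hc1
            · subst hc0
              rw [hdiv0, hv0] at heq
              exact ⟨rfl, hk, hbt, heq⟩
            · exfalso
              subst hc1
              rw [hdiv0, hv1] at heq
              have h9 : 2 ^ t.length ≤ i % 2 ^ m / 2 ^ (m - t.length) := by
                rw [heq]; exact Nat.le_add_right _ _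
              exact absurd h9 (Nat.not_le.2 hrq)
      · constructor
        · intro hpre
          exfalso
          have := hpre.length_le
          rw [length_pvBits] at this
          simp at this
          omega
        · rintro ⟨h1, -, -⟩
          exfalso
          simp at h1
          omega

theorem foldl_ite {β : Type} (cond : β → Bool) (v : β → Int) :
    ∀ (l : List β) (a : Int),
      l.foldl (fun acc x => if cond x then acc + v x else acc) a
        = a + (l.map (fun x => if cond x then v x else 0)).sum := by
  intro l
  induction l with
  | nil => intro a; simp
  | cons x t ih =>
    intro a
    by_cases h : cond x <;> simp [h, ih, add_assoc]

theorem sum_map_range (f : Nat → Int) : ∀ (n : Nat),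
    ((List.range n).map f).sum = ∑ j ∈ Finset.range n, f j := by
  intro n
  induction n with
  | zero => simp
  | succ n ih => simp [List.range_succ, Finset.sum_range_succ, ih]

theorem sum_getD (l : List Int) : l.sum = ∑ j ∈ Finset.range l.length, l.getD j 0 := by
  induction l with
  | nil => simp
  | cons x t ih =>
    rw [List.length_cons, Finset.sum_range_succ', List.sum_cons, ih]
    simp only [List.getD_cons_succ, List.getD_cons_zero]
    ring

theorem slice_sum (l : List Int) (a c : Nat) (h : a + c ≤ l.length) :
    ((l.drop a).take c).sum = ∑ j ∈ Finset.Ico a (a + c), l.getD j 0 := by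
  have hlen : ((l.drop a).take c).length = c := by
    rw [List.length_take, List.length_drop]; omega
  rw [sum_getD ((l.drop a).take c), hlen, Finset.sum_Ico_eq_sum_range]
  have hc : a + c - a = c := by omega
  rw [hc]
  apply Finset.sum_congr rfl
  intro j hj
  simp only [Finset.mem_range] at hj
  rw [List.getD_eq_getElem?_getD, List.getD_eq_getElem?_getD]
  congr 1
  rw [List.getElem?_take_of_lt hj, List.getElem?_drop]

theorem div_eq_iff_bracket (i q p : Nat) (hq : 0 < q) :
    i / q = p ↔ p * q ≤ i ∧ i < (p + 1) * q := by
  constructor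
  · intro h
    subst h
    refine ⟨Nat.div_mul_le_self i q, ?_⟩
    calc i = q * (i / q) + i % q := (Nat.div_add_mod i q).symm
      _ < q * (i / q) + q := Nat.add_lt_add_left (Nat.mod_lt i hq) _
      _ = (i / q + 1) * q := by ring
  · intro ⟨h1, h2⟩
    have ha : p ≤ i / q := (Nat.le_div_iff_mul_le hq).2 h1
    have hb : i / q < p + 1 := (Nat.div_lt_iff_lt_mul hq).2 h2
    omega

theorem zfill_ge (i n : Nat) (h1 : 2 ^ n ≤ i) (h2 : i < 2 ^ (n + 1)) :
    PySem.Chars.zfill (PySem.Int.toBinChars (i : Int)) (n : Int) = pvBits (n + 1) i := by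
  have hpos : 0 < i := lt_of_lt_of_le (Nat.pow_pos (by norm_num)) h1
  have hL : PySem.Int.bitLength (i : Int) = n + 1 := bl_eq i n h1 h2
  rw [toBinChars_eq i hpos, hL]
  exact zfill_of_le _ _ (by rw [length_pvBits]; exact_mod_cast Nat.le_succ n)

theorem prefix_single (cs : List Char) : cs <+: ['0'] ↔ cs = [] ∨ cs = ['0'] := by
  cases cs with
  | nil => simp
  | cons c t =>
    rw [List.cons_prefix_cons]
    constructor
    · rintro ⟨rfl, ht⟩
      right
      have := List.prefix_nil.mp ht
      simp [this]
    · rintro (h | h)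
      · simp at h
      · simp only [List.cons.injEq] at h
        exact ⟨h.1, by simp [h.2]⟩

theorem toList_index_to_bitstring (i : Nat) (nI : Int) :
    (index_to_bitstring (i : Int) nI).toList
      = PySem.Chars.zfill (PySem.Int.toBinChars (i : Int)) nI := by
  have hnn : ¬ ((i : Int) < 0) := by simp
  have h1 : (PySem.Str.slice (PySem.Int.pyBin (i : Int)) (some 2) none).toList
      = PySem.Int.toBinChars (i : Int) := by
    rw [PySem.Str.toList_slice, PySem.Chars.slice_eq_listSlice, PySem.Int.toList_pyBin,
        PySem.List.slice_from _ (by norm_num : (0 : Int) ≤ 2)]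
    unfold PySem.Int.toBinChars0b PySem.Int.toBinChars
    rw [if_neg hnn, if_neg hnn]
    rfl
  unfold index_to_bitstring
  rw [PySem.Str.toList_zfill, h1]

theorem condA_eq (i : Nat) (nI : Int) (prefix_ : String) :
    PySem.Str.startswith (index_to_bitstring (i : Int) nI) prefix_
      = PySem.Chars.startswith (PySem.Chars.zfill (PySem.Int.toBinChars (i : Int)) nI)
          prefix_.toList := by
  unfold PySem.Str.startswith
  rw [toList_index_to_bitstring]

theorem sumA (data : List Int) (prefix_ : String) :
    sum_by_prefix data prefix_ =
      ∑ i ∈ Finset.range data.length,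
        if PySem.Chars.startswith
            (PySem.Chars.zfill (PySem.Int.toBinChars (i : Int))
              ((PySem.Int.bitLength ((data.length : Int)) : Int) - 1)) prefix_.toList
        then data.getD i 0 else 0 := by
  have hbody : sum_by_prefix data prefix_
      = (PySem.List.enumerate data).foldl
          (fun acc iv =>
            if PySem.Str.startswith
                (index_to_bitstring iv.1 ((PySem.Int.bitLength ((data.length : Int)) : Int) - 1))
                prefix_
            then acc + iv.2 else acc) 0 := by
    unfold sum_by_prefix
    rw [PySem.List.len_eq]
  rw [hbody, foldl_ite _ _ _ 0, zero_add]
  have hmap : (PySem.List.enumerate data).map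
        (fun iv => if PySem.Str.startswith
            (index_to_bitstring iv.1 ((PySem.Int.bitLength ((data.length : Int)) : Int) - 1))
            prefix_
          then iv.2 else 0)
      = (List.range data.length).map
        (fun (i : Nat) => if PySem.Chars.startswith
            (PySem.Chars.zfill (PySem.Int.toBinChars (i : Int))
              ((PySem.Int.bitLength ((data.length : Int)) : Int) - 1)) prefix_.toList
          then data.getD i 0 else 0) := by
    apply List.ext_getElem
    · simp [PySem.List.length_enumerate]
    · intro j h1 h2
      have hj : j < data.length := by simpa using h2
      simp only [List.getElem_map, PySem.List.getElem_enumerate, List.getElem_range, zero_add]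
      have hg : data.getD j 0 = data[j] := by
        rw [List.getD_eq_getElem?_getD, List.getElem?_eq_getElem hj, Option.getD_some]
      rw [condA_eq, hg]
  rw [hmap, sum_map_range]

theorem sum_range_band (N a b : Nat) (hb : b ≤ N) (g : Nat → Int) :
    (∑ i ∈ Finset.range N, if a ≤ i ∧ i < b then g i else 0) = ∑ i ∈ Finset.Ico a b, g i := by
  rw [← Finset.sum_filter]
  apply Finset.sum_congr _ (fun _ _ => rfl)
  ext i
  simp only [Finset.mem_filter, Finset.mem_range, Finset.mem_Ico]
  omega

theorem slice_Ico (data : List Int) (a b : Nat) (hbN : b ≤ data.length) (hab : a ≤ b) :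
    (PySem.List.slice data (some (a : Int)) (some (b : Int))).sum
      = ∑ j ∈ Finset.Ico a b, data.getD j 0 := by
  rw [PySem.List.slice_natCast]
  have h := slice_sum data a (b - a) (by omega)
  have hb2 : a + (b - a) = b := by omega
  rw [hb2] at h
  exact h

theorem key (data : List Int) (prefix_ : String) :
    sum_by_prefix data prefix_ = sum_by_prefix_alt data prefix_ := by
  by_cases hN0 : data.length = 0
  · have hnil : data = [] := List.length_eq_zero_iff.mp hN0
    subst hnil
    unfold sum_by_prefix sum_by_prefix_alt
    simp
  · have hN1 : 0 < data.length := Nat.pos_of_ne_zero hN0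
    rw [sumA]
    by_cases hone : data.length = 1
    · -- single-element case: the only bitstring is "0"
      obtain ⟨x, rfl⟩ := List.length_eq_one_iff.mp hone
      have hbs : PySem.Chars.zfill (PySem.Int.toBinChars ((0 : Nat) : Int))
          ((PySem.Int.bitLength ((1 : Nat) : Int) : Int) - 1) = ['0'] := by decide
      rw [show ([x] : List Int).length = 1 from rfl, Finset.sum_range_one, hbs]
      have hsw : (PySem.Chars.startswith ['0'] prefix_.toList = true)
          ↔ (prefix_.toList = [] ∨ prefix_.toList = ['0']) := by
        rw [PySem.Chars.startswith_iff, prefix_single]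
      by_cases hval : (prefix_.toList.all fun c => c = '0' || c = '1') = true
      · have hB : sum_by_prefix_alt [x] prefix_
            = if prefix_.toList = [] ∨ prefix_.toList = ['0'] then x else 0 := by
          simp only [sum_by_prefix_alt, List.length_singleton]
          rw [if_neg (by simp [hval]), if_pos (by decide)]
          simp only [List.headD_cons]
        rw [hB]
        have hg : ([x] : List Int).getD 0 0 = x := rfl
        rw [hg, if_congr hsw rfl rfl]
      · have hB : sum_by_prefix_alt [x] prefix_ = 0 := by
          simp only [sum_by_prefix_alt, List.length_singleton]
          rw [if_pos (Or.inr hval)]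
        have hnc : ¬ (PySem.Chars.startswith ['0'] prefix_.toList = true) := by
          intro hcond
          rw [hsw] at hcond
          apply hval
          rcases hcond with h | h <;> rw [h] <;> decide
        rw [hB, if_neg hnc]
    · -- main case: at least two elements
      have hN2 : 2 ≤ data.length := by omega
      obtain ⟨n, hLn⟩ : ∃ n, PySem.Int.bitLength ((data.length : Int)) = n + 1 := by
        have := bl_pos data.length hN1
        exact ⟨PySem.Int.bitLength ((data.length : Int)) - 1, by omega⟩
      have hcast : ((PySem.Int.bitLength ((data.length : Int)) : Nat) : Int) - 1
          = ((n : Nat) : Int) := by rw [hLn]; push_cast; ring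
      simp only [hcast]
      have hNlt : data.length < 2 ^ (n + 1) := by
        have := lt_two_pow_bl data.length; rwa [hLn] at this
      have hNge : 2 ^ n ≤ data.length := by
        have := two_pow_bl_le data.length hN1; rwa [hLn, Nat.add_sub_cancel] at this
      have hn1 : 1 ≤ n := by
        by_contra hc
        have hn0 : n = 0 := by omega
        rw [hn0] at hNlt
        norm_num at hNlt
        omega
      by_cases hvalid : ∀ c ∈ prefix_.toList, c = '0' ∨ c = '1'
      case neg =>
        have hall : ¬ ((prefix_.toList.all fun c => c = '0' || c = '1') = true) := by
          rw [List.all_eq_true]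
          intro h
          apply hvalid
          intro c hc
          have := h c hc
          simpa using this
        have hB : sum_by_prefix_alt data prefix_ = 0 := by
          unfold sum_by_prefix_alt
          rw [if_pos (Or.inr hall)]
        rw [hB]
        apply Finset.sum_eq_zero
        intro i hi
        rw [Finset.mem_range] at hi
        have hnc : ¬ (PySem.Chars.startswith
            (PySem.Chars.zfill (PySem.Int.toBinChars (i : Int)) ((n : Nat) : Int))
            prefix_.toList = true) := by
          intro hcond
          rw [PySem.Chars.startswith_iff] at hcond
          apply hvalid
          intro c hc
          by_cases hi2 : i < 2 ^ n
          · have hz := pvPad n i hn1 hi2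
            rw [hz] at hcond
            exact mem_pvBits n i (hcond.sublist.subset hc)
          · have hz := zfill_ge i n (by omega) (by omega)
            rw [hz] at hcond
            exact mem_pvBits (n + 1) i (hcond.sublist.subset hc)
        exact if_neg hnc
      case pos =>
        have hall : (prefix_.toList.all fun c => c = '0' || c = '1') = true := by
          rw [List.all_eq_true]
          intro c hc
          rcases hvalid c hc with h | h <;> simp [h]
        have hpk : pvBinVal prefix_.toList + 1 ≤ 2 ^ prefix_.toList.length :=
          pvBinVal_lt prefix_.toList
        have hb1 : prefix_.toList.length ≤ n →
            (pvBinVal prefix_.toList + 1) * 2 ^ (n - prefix_.toList.length) ≤ 2 ^ n := by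
          intro h
          calc (pvBinVal prefix_.toList + 1) * 2 ^ (n - prefix_.toList.length)
              ≤ 2 ^ prefix_.toList.length * 2 ^ (n - prefix_.toList.length) :=
                Nat.mul_le_mul_right _ hpk
            _ = 2 ^ n := by rw [← pow_add]; congr 1; omega
        have hb2 : prefix_.toList.length ≤ n + 1 →
            (pvBinVal prefix_.toList + 1) * 2 ^ (n + 1 - prefix_.toList.length) ≤ 2 ^ (n + 1) := by
          intro h
          calc (pvBinVal prefix_.toList + 1) * 2 ^ (n + 1 - prefix_.toList.length)
              ≤ 2 ^ prefix_.toList.length * 2 ^ (n + 1 - prefix_.toList.length) :=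
                Nat.mul_le_mul_right _ hpk
            _ = 2 ^ (n + 1) := by rw [← pow_add]; congr 1; omega
        have hq1 : (0 : Nat) < 2 ^ (n - prefix_.toList.length) := Nat.pow_pos (by norm_num)
        have hq2 : (0 : Nat) < 2 ^ (n + 1 - prefix_.toList.length) := Nat.pow_pos (by norm_num)
        have hmain : ∀ i, i < data.length →
            ((PySem.Chars.startswith
                (PySem.Chars.zfill (PySem.Int.toBinChars (i : Int)) ((n : Nat) : Int))
                prefix_.toList = true)
              ↔ ((prefix_.toList.length ≤ n ∧
                    pvBinVal prefix_.toList * 2 ^ (n - prefix_.toList.length) ≤ i ∧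
                    i < (pvBinVal prefix_.toList + 1) * 2 ^ (n - prefix_.toList.length)) ∨
                  (prefix_.toList.length ≤ n + 1 ∧
                    max (pvBinVal prefix_.toList * 2 ^ (n + 1 - prefix_.toList.length)) (2 ^ n) ≤ i ∧
                    i < min ((pvBinVal prefix_.toList + 1) * 2 ^ (n + 1 - prefix_.toList.length))
                          data.length))) := by
          intro i hiN
          rw [PySem.Chars.startswith_iff]
          by_cases hi2 : i < 2 ^ n
          · rw [pvPad n i hn1 hi2, prefix_iff prefix_.toList n i hi2]
            constructor
            · rintro ⟨h1, h2, h3⟩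
              left
              rw [div_eq_iff_bracket _ _ _ hq1] at h3
              exact ⟨h1, h3.1, h3.2⟩
            · rintro (⟨h1, h2, h3⟩ | ⟨h1, h2, h3⟩)
              · exact ⟨h1, hvalid, (div_eq_iff_bracket _ _ _ hq1).2 ⟨h2, h3⟩⟩
              · exfalso; omega
          · rw [Nat.not_lt] at hi2
            rw [zfill_ge i n hi2 (by omega), prefix_iff prefix_.toList (n + 1) i (by omega)]
            constructor
            · rintro ⟨h1, h2, h3⟩
              right
              rw [div_eq_iff_bracket _ _ _ hq2] at h3
              exact ⟨h1, by omega, by omega⟩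
            · rintro (⟨h1, h2, h3⟩ | ⟨h1, h2, h3⟩)
              · exfalso
                have := hb1 h1
                omega
              · exact ⟨h1, hvalid, (div_eq_iff_bracket _ _ _ hq2).2 ⟨by omega, by omega⟩⟩
        have hrw : (∑ i ∈ Finset.range data.length,
              if PySem.Chars.startswith
                  (PySem.Chars.zfill (PySem.Int.toBinChars (i : Int)) ((n : Nat) : Int))
                  prefix_.toList
              then data.getD i 0 else 0)
            = ∑ i ∈ Finset.range data.length,
              if ((prefix_.toList.length ≤ n ∧
                    pvBinVal prefix_.toList * 2 ^ (n - prefix_.toList.length) ≤ i ∧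
                    i < (pvBinVal prefix_.toList + 1) * 2 ^ (n - prefix_.toList.length)) ∨
                  (prefix_.toList.length ≤ n + 1 ∧
                    max (pvBinVal prefix_.toList * 2 ^ (n + 1 - prefix_.toList.length)) (2 ^ n) ≤ i ∧
                    i < min ((pvBinVal prefix_.toList + 1) * 2 ^ (n + 1 - prefix_.toList.length))
                          data.length))
              then data.getD i 0 else 0 :=
          Finset.sum_congr rfl (fun i hi =>
            if_congr (hmain i (Finset.mem_range.1 hi)) rfl rfl)
        rw [hrw]
        have hsplitsum : (∑ i ∈ Finset.range data.length,
              if ((prefix_.toList.length ≤ n ∧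
                    pvBinVal prefix_.toList * 2 ^ (n - prefix_.toList.length) ≤ i ∧
                    i < (pvBinVal prefix_.toList + 1) * 2 ^ (n - prefix_.toList.length)) ∨
                  (prefix_.toList.length ≤ n + 1 ∧
                    max (pvBinVal prefix_.toList * 2 ^ (n + 1 - prefix_.toList.length)) (2 ^ n) ≤ i ∧
                    i < min ((pvBinVal prefix_.toList + 1) * 2 ^ (n + 1 - prefix_.toList.length))
                          data.length))
              then data.getD i 0 else 0)
            = (∑ i ∈ Finset.range data.length,
                if (prefix_.toList.length ≤ n ∧
                    pvBinVal prefix_.toList * 2 ^ (n - prefix_.toList.length) ≤ i ∧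
                    i < (pvBinVal prefix_.toList + 1) * 2 ^ (n - prefix_.toList.length))
                then data.getD i 0 else 0)
              + (∑ i ∈ Finset.range data.length,
                if (prefix_.toList.length ≤ n + 1 ∧
                    max (pvBinVal prefix_.toList * 2 ^ (n + 1 - prefix_.toList.length)) (2 ^ n) ≤ i ∧
                    i < min ((pvBinVal prefix_.toList + 1) * 2 ^ (n + 1 - prefix_.toList.length))
                          data.length)
                then data.getD i 0 else 0) := by
          rw [← Finset.sum_add_distrib]
          apply Finset.sum_congr rfl
          intro i hi
          by_cases h1 : (prefix_.toList.length ≤ n ∧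
              pvBinVal prefix_.toList * 2 ^ (n - prefix_.toList.length) ≤ i ∧
              i < (pvBinVal prefix_.toList + 1) * 2 ^ (n - prefix_.toList.length))
          · have h2 : ¬ (prefix_.toList.length ≤ n + 1 ∧
                max (pvBinVal prefix_.toList * 2 ^ (n + 1 - prefix_.toList.length)) (2 ^ n) ≤ i ∧
                i < min ((pvBinVal prefix_.toList + 1) * 2 ^ (n + 1 - prefix_.toList.length))
                      data.length) := by
              have := hb1 h1.1
              rintro ⟨-, hmax, -⟩
              omega
            rw [if_pos (Or.inl h1), if_pos h1, if_neg h2, add_zero]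
          · by_cases h2 : (prefix_.toList.length ≤ n + 1 ∧
                max (pvBinVal prefix_.toList * 2 ^ (n + 1 - prefix_.toList.length)) (2 ^ n) ≤ i ∧
                i < min ((pvBinVal prefix_.toList + 1) * 2 ^ (n + 1 - prefix_.toList.length))
                      data.length)
            · rw [if_pos (Or.inr h2), if_neg h1, if_pos h2, zero_add]
            · rw [if_neg (by rintro (h | h); exacts [h1 h, h2 h]), if_neg h1, if_neg h2, add_zero]
        rw [hsplitsum]
        -- now evaluate B
        have hc1 : ¬ (data.length = 0 ∨
            ¬ ((prefix_.toList.all fun c => c = '0' || c = '1') = true)) := by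
          rintro (h | h)
          · exact hN0 h
          · exact h hall
        simp only [sum_by_prefix_alt, hLn, Nat.add_sub_cancel, Nat.shiftLeft_eq, one_mul]
        rw [if_neg hc1, if_neg (by omega : ¬ n = 0)]
        congr 1
        · by_cases hkn : prefix_.toList.length ≤ n
          · rw [if_pos hkn]
            have h1 : (∑ i ∈ Finset.range data.length,
                  if (prefix_.toList.length ≤ n ∧
                      pvBinVal prefix_.toList * 2 ^ (n - prefix_.toList.length) ≤ i ∧
                      i < (pvBinVal prefix_.toList + 1) * 2 ^ (n - prefix_.toList.length))
                  then data.getD i 0 else 0)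
                = ∑ i ∈ Finset.range data.length,
                  if (pvBinVal prefix_.toList * 2 ^ (n - prefix_.toList.length) ≤ i ∧
                      i < (pvBinVal prefix_.toList + 1) * 2 ^ (n - prefix_.toList.length))
                  then data.getD i 0 else 0 :=
              Finset.sum_congr rfl (fun i _ => if_congr
                ⟨fun h => h.2, fun h => ⟨hkn, h⟩⟩ rfl rfl)
            rw [h1, sum_range_band _ _ _ (le_trans (hb1 hkn) hNge) _,
                slice_Ico data _ _ (le_trans (hb1 hkn) hNge) (Nat.mul_le_mul_right _ (by omega))]
          · rw [if_neg hkn]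
            apply Finset.sum_eq_zero
            intro i hi
            exact if_neg (by rintro ⟨h, -⟩; exact hkn h)
        · by_cases hkn1 : prefix_.toList.length ≤ n + 1
          · rw [if_pos hkn1]
            by_cases hlh : max (pvBinVal prefix_.toList * 2 ^ (n + 1 - prefix_.toList.length)) (2 ^ n)
                < min ((pvBinVal prefix_.toList + 1) * 2 ^ (n + 1 - prefix_.toList.length))
                    data.length
            · rw [if_pos hlh]
              have h1 : (∑ i ∈ Finset.range data.length,
                    if (prefix_.toList.length ≤ n + 1 ∧
                        max (pvBinVal prefix_.toList * 2 ^ (n + 1 - prefix_.toList.length)) (2 ^ n) ≤ i ∧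
                        i < min ((pvBinVal prefix_.toList + 1) * 2 ^ (n + 1 - prefix_.toList.length))
                              data.length)
                    then data.getD i 0 else 0)
                  = ∑ i ∈ Finset.range data.length,
                    if (max (pvBinVal prefix_.toList * 2 ^ (n + 1 - prefix_.toList.length)) (2 ^ n) ≤ i ∧
                        i < min ((pvBinVal prefix_.toList + 1) * 2 ^ (n + 1 - prefix_.toList.length))
                              data.length)
                    then data.getD i 0 else 0 :=
                Finset.sum_congr rfl (fun i _ => if_congr
                  ⟨fun h => h.2, fun h => ⟨hkn1, h⟩⟩ rfl rfl)
              rw [h1, sum_range_band _ _ _ (by omega) _,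
                  slice_Ico data _ _ (by omega) (le_of_lt hlh)]
            · rw [if_neg hlh]
              apply Finset.sum_eq_zero
              intro i hi
              exact if_neg (by rintro ⟨-, hle, hlt⟩; omega)
          · rw [if_neg hkn1]
            apply Finset.sum_eq_zero
            intro i hi
            exact if_neg (by rintro ⟨h, -⟩; exact hkn1 h)

-- ===== VERDICT (by name: the statement is the Claim_ definition above) =====
theorem sum_by_prefix_spec : Claim_equal_sum_by_prefix := by
  intro data prefix_ _
  unfold Spec_sum_by_prefix
  exact key data prefix_
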